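-- pv_equiv track=rewrite | github.com/marco-cruzmaya/Probability-Simulations | src/simulations/simulationPoisson.py | presentarMuestras
-- ===== SOURCE A (Python) =====
-- def presentarMuestras(arregloMuestras):
--     n = len(arregloMuestras) #longitud del arreglo
--     s = "[ "
--     j = 0
--     if n == 0:
--         return s + "]"
--     for i in range(0,n):
--         if i == n-1:
--             s = s + str(arregloMuestras[i]) + " ]"
--         else:
--             if j == 15:
--                 s = s + str(arregloMuestras[i]) + ", \n  "
--                 j = 0
--             else:
--                 s = s + str(arregloMuestras[i]) + ", "
--                 j += 1
--     return s
-- ===== SOURCE B (Python) =====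
-- def presentarMuestras(arregloMuestras):
--     if len(arregloMuestras) == 0:
--         return "[ ]"
--     strs = [str(x) for x in arregloMuestras]
--     lines = []
--     while strs:
--         lines.append(", ".join(strs[:16]))
--         strs = strs[16:]
--     return "[ " + ", \n  ".join(lines) + " ]"
-- ===== Notes on version B (the rewrite author's own statement) =====
-- stated objective: simpler
-- what changed: Replaces the element-by-element string concatenation with a manually maintained wrap counter (reset at 15) and a last-index special case by a group-then-join pass: stringify all elements, split into chunks of 16, join each chunk with ', ' and the chunks with ', \n ', then wrap in brackets.
import Mathlib
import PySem

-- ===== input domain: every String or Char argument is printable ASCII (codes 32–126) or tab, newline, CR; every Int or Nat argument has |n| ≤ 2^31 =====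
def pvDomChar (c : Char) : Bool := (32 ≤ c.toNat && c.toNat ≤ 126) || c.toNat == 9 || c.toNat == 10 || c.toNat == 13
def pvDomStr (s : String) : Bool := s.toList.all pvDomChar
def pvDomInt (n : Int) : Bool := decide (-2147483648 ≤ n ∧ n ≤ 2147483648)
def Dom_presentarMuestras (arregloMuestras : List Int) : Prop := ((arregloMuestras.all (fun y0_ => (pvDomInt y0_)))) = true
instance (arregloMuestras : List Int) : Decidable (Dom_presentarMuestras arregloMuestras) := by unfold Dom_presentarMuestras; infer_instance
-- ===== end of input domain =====

-- B replaces A's element-by-element concatenation with a wrap counter by a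
-- group-into-chunks-of-16-then-join pass (objective: simpler/alternative decomposition).


-- ===== PORT A =====
-- Literal transliteration of A; n = len(arregloMuestras), s = "[ ", j = 0 are inlined,
-- the for-loop is a foldl over range(0, n) with state (s, j); arregloMuestras[i] is
-- PySem.List.pyGetD (always in range here).
def presentarMuestras (arregloMuestras : List Int) : String :=
  if (arregloMuestras.length : Int) = 0 then "[ " ++ "]"
  else
    (((PySem.List.pyRange 0 (arregloMuestras.length : Int) 1).foldl
      (fun (acc : String × Int) i =>
        if i = (arregloMuestras.length : Int) - 1 then
          (acc.1 ++ PySem.Int.toStr (PySem.List.pyGetD arregloMuestras i 0) ++ " ]", acc.2)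
        else if acc.2 = 15 then
          (acc.1 ++ PySem.Int.toStr (PySem.List.pyGetD arregloMuestras i 0) ++ ", \n  ", 0)
        else
          (acc.1 ++ PySem.Int.toStr (PySem.List.pyGetD arregloMuestras i 0) ++ ", ", acc.2 + 1))
      ("[ ", 0))).1

-- ===== PORT B =====
-- sep.join(list) of Python, ported by hand (exact: "" on [], no trailing separator).
def pvJoin (sep : String) : List String → String
  | [] => ""
  | [a] => a
  | a :: b :: t => a ++ sep ++ pvJoin sep (b :: t)

-- B's while-loop: peel chunks of 16 (strs[:16] / strs[16:] are take/drop, exact by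
-- PySem.List.slice_to_natCast / slice_from_natCast), joining each chunk with ", ".
def pvChunkLines (strs : List String) : List String :=
  if _h : strs = [] then []
  else pvJoin ", " (strs.take 16) :: pvChunkLines (strs.drop 16)
termination_by strs.length
decreasing_by
  cases strs with
  | nil => exact absurd rfl _h
  | cons x xs => simp [List.length_drop]

def presentarMuestras_alt (arregloMuestras : List Int) : String :=
  if arregloMuestras.length = 0 then "[ ]"
  else
    "[ " ++ pvJoin ", \n  " (pvChunkLines (arregloMuestras.map PySem.Int.toStr)) ++ " ]"

-- ===== PRECONDITION & SPEC =====
def Spec_presentarMuestras (arregloMuestras : List Int) (out : String) : Prop := out = presentarMuestras_alt arregloMuestras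
instance (arregloMuestras : List Int) (out : String) : Decidable (Spec_presentarMuestras arregloMuestras out) := by unfold Spec_presentarMuestras; infer_instance

-- ===== CLAIM (what is proved, stated in full; the proofs are below) =====
def Claim_equal_presentarMuestras : Prop := ∀ (arregloMuestras : List Int), Dom_presentarMuestras arregloMuestras → Spec_presentarMuestras arregloMuestras (presentarMuestras arregloMuestras)

-- ===== LEMMAS AND PROOFS =====

-- Rendering of the remaining tail of the list when the wrap counter is j.
def pvRep : List Int → Int → String
  | [], _ => ""
  | [x], _ => PySem.Int.toStr x ++ " ]"
  | x :: y :: xs, j =>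
    if j = 15 then PySem.Int.toStr x ++ ", \n  " ++ pvRep (y :: xs) 0
    else PySem.Int.toStr x ++ ", " ++ pvRep (y :: xs) (j + 1)

theorem pvChunkLines_ne_nil (strs : List String) (h : strs ≠ []) : pvChunkLines strs ≠ [] := by
  rw [pvChunkLines]
  simp [h]

-- pvRep consumes exactly one (possibly partial) chunk before resetting the counter.
theorem pvRep_chunk (l : List Int) : ∀ (j : Int), 0 ≤ j → j ≤ 15 → l ≠ [] →
    pvRep l j = if l.length ≤ 16 - j.toNat
      then pvJoin ", " (l.map PySem.Int.toStr) ++ " ]"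
      else pvJoin ", " ((l.take (16 - j.toNat)).map PySem.Int.toStr) ++ ", \n  "
            ++ pvRep (l.drop (16 - j.toNat)) 0 := by
  induction l with
  | nil => intro j _ _ h; exact absurd rfl h
  | cons x xs ih =>
    intro j h0 h15 _
    cases xs with
    | nil =>
      have : (1 : Nat) ≤ 16 - j.toNat := by omega
      simp [pvRep, pvJoin, this]
    | cons y ys =>
      by_cases hj : j = 15
      · subst hj
        have hc : ¬ ((x :: y :: ys).length ≤ 16 - (15 : Int).toNat) := by
          simp
        simp only [pvRep, hc, if_false]
        have h1 : (16 - (15 : Int).toNat) = 1 := by decide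
        rw [h1]
        simp [pvJoin]
      · have hj' : j.toNat ≤ 14 := by omega
        simp only [pvRep, if_neg hj]
        rw [ih (j + 1) (by omega) (by omega) (by simp)]
        have ht : (16 - (j + 1).toNat) = 15 - j.toNat := by omega
        rw [ht]
        by_cases hlen : (y :: ys).length ≤ 15 - j.toNat
        · have hlen' : (x :: y :: ys).length ≤ 16 - j.toNat := by simp at hlen ⊢; omega
          rw [if_pos hlen, if_pos hlen']
          have hyne : (y :: ys).map PySem.Int.toStr ≠ [] := by simp
          cases hm : (y :: ys).map PySem.Int.toStr with
          | nil => exact absurd hm hyne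
          | cons b t =>
            simp only [List.map_cons] at hm ⊢
            rw [hm, pvJoin]
            simp [String.append_assoc]
        · have hlen' : ¬ (x :: y :: ys).length ≤ 16 - j.toNat := by simp at hlen ⊢; omega
          rw [if_neg hlen, if_neg hlen']
          have htk : (x :: y :: ys).take (16 - j.toNat) = x :: (y :: ys).take (15 - j.toNat) := by
            have : 16 - j.toNat = (15 - j.toNat) + 1 := by omega
            rw [this, List.take_succ_cons]
          have hdr : (x :: y :: ys).drop (16 - j.toNat) = (y :: ys).drop (15 - j.toNat) := by
            have : 16 - j.toNat = (15 - j.toNat) + 1 := by omega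
            rw [this, List.drop_succ_cons]
          rw [htk, hdr]
          have hyne : ((y :: ys).take (15 - j.toNat)).map PySem.Int.toStr ≠ [] := by
            simp; omega
          cases hm : ((y :: ys).take (15 - j.toNat)).map PySem.Int.toStr with
          | nil => exact absurd hm hyne
          | cons b t =>
            simp only [List.map_cons]
            rw [hm, pvJoin]
            simp [String.append_assoc]

-- pvRep from a fresh line equals B's chunked join.
theorem pvRep_eq_chunks : ∀ (n : Nat) (l : List Int), l.length ≤ n → l ≠ [] →
    pvRep l 0 = pvJoin ", \n  " (pvChunkLines (l.map PySem.Int.toStr)) ++ " ]" := by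
  intro n
  induction n with
  | zero => intro l hl hne; cases l with
    | nil => exact absurd rfl hne
    | cons x xs => simp at hl
  | succ m ih =>
    intro l hl hne
    rw [pvRep_chunk l 0 (by omega) (by omega) hne]
    have hmap : l.map PySem.Int.toStr ≠ [] := by simpa using hne
    rw [pvChunkLines, dif_neg hmap]
    have h16 : ((0 : Int)).toNat = 0 := rfl
    rw [h16]
    by_cases hlen : l.length ≤ 16 - 0
    · rw [if_pos hlen]
      have hdrop : (l.map PySem.Int.toStr).drop 16 = [] := by
        simp; omega
      rw [hdrop, pvChunkLines]
      have htake : (l.map PySem.Int.toStr).take 16 = l.map PySem.Int.toStr := by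
        apply List.take_of_length_le; simp; omega
      rw [htake]
      simp [pvJoin]
    · rw [if_neg hlen]
      have hdne : l.drop 16 ≠ [] := by
        simp only [ne_eq, List.drop_eq_nil_iff]
        omega
      rw [ih (l.drop 16) (by simp; omega) hdne]
      have hcne : pvChunkLines ((l.map PySem.Int.toStr).drop 16) ≠ [] := by
        apply pvChunkLines_ne_nil
        simp only [ne_eq, List.drop_eq_nil_iff, List.length_map]
        omega
      cases hc : pvChunkLines ((l.map PySem.Int.toStr).drop 16) with
      | nil => exact absurd hc hcne
      | cons c t =>
        simp only [Nat.sub_zero, List.map_take, List.map_drop]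
        rw [hc, pvJoin]
        simp [String.append_assoc]

-- A's fold, started at index a with wrap counter j, appends pvRep of the remaining tail.
theorem pvAfold (l : List Int) : ∀ (tail : List Int) (a : Int) (s : String) (j : Int),
    tail ≠ [] → 0 ≤ a → a + tail.length = l.length → tail = l.drop a.toNat →
    ((PySem.List.pyRange a (l.length : Int) 1).foldl
      (fun (acc : String × Int) i =>
        if i = (l.length : Int) - 1 then
          (acc.1 ++ PySem.Int.toStr (PySem.List.pyGetD l i 0) ++ " ]", acc.2)
        else if acc.2 = 15 then
          (acc.1 ++ PySem.Int.toStr (PySem.List.pyGetD l i 0) ++ ", \n  ", 0)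
        else
          (acc.1 ++ PySem.Int.toStr (PySem.List.pyGetD l i 0) ++ ", ", acc.2 + 1))
      (s, j)).1 = s ++ pvRep tail j := by
  intro tail
  induction tail with
  | nil => intro a s j h; exact absurd rfl h
  | cons x xs ih =>
    intro a s j _ ha hlen hdrop
    have haltn : a < (l.length : Int) := by simp at hlen ⊢; omega
    rw [PySem.List.pyRange_one_cons haltn, List.foldl_cons]
    have hget : PySem.List.pyGetD l a 0 = x := by
      rw [PySem.List.pyGetD_eq_getElem l 0 ha haltn]
      have h3 : l[a.toNat]? = some x := by
        rw [← List.head?_drop, ← hdrop]; rfl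
      exact (List.getElem_eq_iff (by omega)).mpr h3
    have hdrop' : xs = l.drop (a.toNat + 1) := by
      rw [← List.drop_drop (i := 1) (j := a.toNat) (l := l), ← hdrop]
      simp
    cases xs with
    | nil =>
      have hlast : a = (l.length : Int) - 1 := by simp at hlen; omega
      rw [if_pos hlast]
      have hnil : PySem.List.pyRange (a + 1) (l.length : Int) 1 = [] :=
        PySem.List.pyRange_one_eq_nil (by omega)
      rw [hnil, List.foldl_nil]
      simp [hget, pvRep, String.append_assoc]
    | cons y ys =>
      have hne : ¬ a = (l.length : Int) - 1 := by simp at hlen; omega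
      rw [if_neg hne]
      have htn : (a + 1).toNat = a.toNat + 1 := by omega
      by_cases hj : j = 15
      · subst hj
        simp only [if_true]
        rw [ih (a + 1) _ 0 (by simp) (by omega) (by simp at hlen ⊢; omega) (by rw [htn]; exact hdrop')]
        simp [hget, pvRep, String.append_assoc]
      · simp only [if_neg hj]
        rw [ih (a + 1) _ (j + 1) (by simp) (by omega) (by simp at hlen ⊢; omega) (by rw [htn]; exact hdrop')]
        simp [hget, pvRep, hj, String.append_assoc]

-- ===== VERDICT (by name: the statement is the Claim_ definition above) =====
theorem presentarMuestras_spec : Claim_equal_presentarMuestras := by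
  intro l _
  unfold Spec_presentarMuestras presentarMuestras presentarMuestras_alt
  cases hl : l with
  | nil => decide
  | cons x xs =>
    have hne : l ≠ [] := by rw [hl]; simp
    rw [← hl]
    have hn : ¬ ((l.length : Int) = 0) := by
      simp only [ne_eq] at hne
      simp [List.length_eq_zero_iff, hne]
    have hn' : ¬ (l.length = 0) := by
      simp [List.length_eq_zero_iff, hne]
    rw [if_neg hn, if_neg hn']
    rw [pvAfold l l 0 "[ " 0 hne (by omega) (by omega) (by simp)]
    rw [pvRep_eq_chunks l.length l (le_refl _) hne]
    simp [String.append_assoc]
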